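-- pv_equiv track=rewrite | github.com/yoggi-yalla/aoc2023 | 22/solution.py | chain_reaction
-- ===== SOURCE A (Python) =====
-- import copy
--
-- def chain_reaction(deps, brick):
--
--     deps = copy.deepcopy(deps)
--
--     n = 0
--     buffer = [brick]
--     while buffer:
--         brick = buffer.pop()
--         for k, v in deps.items():
--             if brick in v:
--                 deps[k].remove(brick)
--                 if len(v) == 0:
--                     buffer.append(k)
--                     n += 1
--     return n
-- ===== SOURCE B (Python) =====
-- def chain_reaction(deps, brick):
--     # Precompute a reverse index (supporter -> distinct dependents) together with
--     # per-pair multiplicities and per-brick remaining-support counters; the cascade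
--     # then just decrements counters along the reverse edges of each fallen brick.
--     rev = {}
--     cnt = {}
--     total = {}
--     for k, v in deps.items():
--         total[k] = len(v)
--         for s in v:
--             if (k, s) in cnt:
--                 cnt[(k, s)] += 1
--             else:
--                 cnt[(k, s)] = 1
--                 rev.setdefault(s, []).append(k)
--     n = 0
--     stack = [brick]
--     while stack:
--         s = stack.pop()
--         for k in rev.get(s, []):
--             c = cnt[(k, s)]
--             if c > 0:
--                 cnt[(k, s)] = c - 1
--                 total[k] -= 1
--                 if total[k] == 0:
--                     stack.append(k)
--                     n += 1
--     return n
-- ===== Notes on version B (the rewrite author's own statement) =====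
-- stated objective: faster
-- what changed: B never mutates dependency lists: it precomputes a reverse index (supporter -> distinct dependents), per-pair multiplicity counters and per-brick remaining-support totals, and the cascade just decrements counters along the reverse edges of each fallen brick instead of A's rescan of every brick's list per popped brick.
import Mathlib
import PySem

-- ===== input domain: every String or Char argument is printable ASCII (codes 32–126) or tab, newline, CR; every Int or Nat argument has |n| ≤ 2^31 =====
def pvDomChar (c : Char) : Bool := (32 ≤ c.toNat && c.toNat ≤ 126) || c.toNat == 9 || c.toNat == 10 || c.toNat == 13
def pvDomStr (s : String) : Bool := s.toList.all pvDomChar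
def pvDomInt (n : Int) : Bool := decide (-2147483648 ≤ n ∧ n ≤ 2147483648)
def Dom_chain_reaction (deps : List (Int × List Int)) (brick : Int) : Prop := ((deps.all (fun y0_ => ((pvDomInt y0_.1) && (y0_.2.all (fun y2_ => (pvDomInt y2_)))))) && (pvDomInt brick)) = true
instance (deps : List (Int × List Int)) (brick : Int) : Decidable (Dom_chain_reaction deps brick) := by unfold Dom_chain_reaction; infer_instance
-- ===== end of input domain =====

-- B replaces A's per-pop rescan and list mutation by a precomputed reverse index with
-- multiplicity counters and remaining-support totals; the cascade only decrements counters.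

-- ===== PORT A =====
-- one step of A's inner `for k, v in deps.items()` loop; p is the snapshot item (k, v)
def crStepA (s : Int) (st : PySem.Dict Int (List Int) × List Int × Int)
    (p : Int × List Int) : PySem.Dict Int (List Int) × List Int × Int :=
  match PySem.List.remove? p.2 s with          -- `if brick in v: deps[k].remove(brick)`
  | none => st
  | some v' =>
    let d' := st.1.insert p.1 v'
    if v'.length = 0 then (d', st.2.1 ++ [p.1], st.2.2 + 1) else (d', st.2.1, st.2.2)

-- the `while buffer:` loop; each pop appends at most one entry per key, so
-- the number of pops is at most size + 1 and that fuel never runs out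
def crLoopA : Nat → PySem.Dict Int (List Int) → List Int → Int → Int
  | 0, _, _, n => n
  | fuel+1, d, buffer, n =>
    match PySem.List.pop? buffer with          -- brick = buffer.pop()
    | none => n
    | some (s, buffer') =>
      let st := d.items.foldl (crStepA s) (d, buffer', n)
      crLoopA fuel st.1 st.2.1 st.2.2

def chain_reaction (deps : List (Int × List Int)) (brick : Int) : Int :=
  let d := PySem.Dict.ofList deps
  crLoopA (d.size + 1) d [brick] 0

-- ===== PORT B =====
-- one step of B's inner build loop `for s in v:` for the current key k;
-- state is (rev, cnt, total); `rev.setdefault(s, []).append(k)` is modify s [] (· ++ [k])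
def crBuildStep (k : Int)
    (st : PySem.Dict Int (List Int) × PySem.Dict (Int × Int) Int × PySem.Dict Int Int)
    (s : Int) :
    PySem.Dict Int (List Int) × PySem.Dict (Int × Int) Int × PySem.Dict Int Int :=
  match st.2.1.get? (k, s) with                -- `if (k, s) in cnt:`
  | some c => (st.1, st.2.1.insert (k, s) (c + 1), st.2.2)
  | none => (st.1.modify s [] (· ++ [k]), st.2.1.insert (k, s) 1, st.2.2)

-- B's first pass `for k, v in deps.items(): total[k] = len(v); for s in v: …`
def crBuild (ps : List (Int × List Int)) :
    PySem.Dict Int (List Int) × PySem.Dict (Int × Int) Int × PySem.Dict Int Int :=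
  ps.foldl (fun st p =>
      p.2.foldl (crBuildStep p.1) (st.1, st.2.1, st.2.2.insert p.1 (p.2.length : Int)))
    (PySem.Dict.empty, PySem.Dict.empty, PySem.Dict.empty)

-- one step of B's `for k in rev.get(s, [])` loop; state is (cnt, total, stack, n).
-- cnt[(k, s)] and total[k] always exist for k in rev[s], so getD is exact here.
def crStepC (s : Int)
    (st : PySem.Dict (Int × Int) Int × PySem.Dict Int Int × List Int × Int) (k : Int) :
    PySem.Dict (Int × Int) Int × PySem.Dict Int Int × List Int × Int :=
  let c := st.1.getD (k, s) 0
  if 0 < c then                                 -- `if c > 0:`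
    let cnt' := st.1.insert (k, s) (c - 1)
    let t := st.2.1.getD k 0 - 1                -- `total[k] -= 1`
    if t = 0 then (cnt', st.2.1.insert k t, st.2.2.1 ++ [k], st.2.2.2 + 1)
    else (cnt', st.2.1.insert k t, st.2.2.1, st.2.2.2)
  else st

def crLoopC : Nat → PySem.Dict Int (List Int) → PySem.Dict (Int × Int) Int →
    PySem.Dict Int Int → List Int → Int → Int
  | 0, _, _, _, _, n => n
  | fuel+1, rev, cnt, total, buffer, n =>
    match PySem.List.pop? buffer with          -- s = stack.pop()
    | none => n
    | some (s, buffer') =>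
      let st := (rev.getD s []).foldl (crStepC s) (cnt, total, buffer', n)
      crLoopC fuel rev st.1 st.2.1 st.2.2.1 st.2.2.2

def chain_reaction_alt (deps : List (Int × List Int)) (brick : Int) : Int :=
  let d := PySem.Dict.ofList deps
  let b := crBuild d.items
  crLoopC (d.size + 1) b.1 b.2.1 b.2.2 [brick] 0

-- ===== PRECONDITION & SPEC =====
def Spec_chain_reaction (deps : List (Int × List Int)) (brick : Int) (out : Int) : Prop := out = chain_reaction_alt deps brick
instance (deps : List (Int × List Int)) (brick : Int) (out : Int) : Decidable (Spec_chain_reaction deps brick out) := by unfold Spec_chain_reaction; infer_instance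

-- ===== CLAIM (what is proved, stated in full; the proofs are below) =====
def Claim_equal_chain_reaction : Prop := ∀ (deps : List (Int × List Int)) (brick : Int), Dom_chain_reaction deps brick → Spec_chain_reaction deps brick (chain_reaction deps brick)

-- ===== LEMMAS AND PROOFS =====

-- proof-only ghost step: A's item step re-read through the live dict (never executed by either port)
def crStepL (s : Int) (st : PySem.Dict Int (List Int) × List Int × Int)
    (k : Int) : PySem.Dict Int (List Int) × List Int × Int :=
  match PySem.List.remove? (st.1.getD k []) s with
  | none => st
  | some v' =>
    let d' := st.1.insert k v'
    if v'.length = 0 then (d', st.2.1 ++ [k], st.2.2 + 1) else (d', st.2.1, st.2.2)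

-- the invariant: every remaining dependency list is a sub-collection of the original one
def crInv (d0 d : PySem.Dict Int (List Int)) : Prop :=
  ∀ k v, d.get? k = some v → ∀ x ∈ v, x ∈ d0.getD k []

-- the simulation relation between A's live lists and B's counters
def crRel (d : PySem.Dict Int (List Int)) (cnt : PySem.Dict (Int × Int) Int)
    (total : PySem.Dict Int Int) : Prop :=
  (∀ k, total.getD k 0 = ((d.getD k []).length : Int)) ∧
  (∀ k s, cnt.getD (k, s) 0 = ((d.getD k []).count s : Int))

theorem crRemove?_subset {v v' : List Int} {s : Int}
    (h : PySem.List.remove? v s = some v') : ∀ x ∈ v', x ∈ v := by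
  unfold PySem.List.remove? at h
  rcases hi : List.idxOf? s v with _ | i <;> rw [hi] at h
  · simp at h
  · simp only [Option.map_some, Option.some.injEq] at h
    subst h
    intro x hx
    exact List.eraseIdx_subset hx

theorem crRemove?_none {v : List Int} {s : Int}
    (h : s ∉ v) : PySem.List.remove? v s = none := by
  rw [PySem.List.remove?_eq_none_iff]; exact h

-- snapshot reads equal live reads: A's fold over the items snapshot
-- equals the ghost step function folded over the keys
theorem crFoldA_eq_foldL (s : Int) :
    ∀ (ps : List (Int × List Int)) (st : PySem.Dict Int (List Int) × List Int × Int),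
      (∀ p ∈ ps, st.1.get? p.1 = some p.2) → (ps.map (·.1)).Nodup →
      ps.foldl (crStepA s) st = (ps.map (·.1)).foldl (crStepL s) st := by
  intro ps
  induction ps with
  | nil => intro st _ _; rfl
  | cons p tl ih =>
    intro st hget hnd
    have hpv : st.1.get? p.1 = some p.2 := hget p (by simp)
    have hgetD : st.1.getD p.1 [] = p.2 := PySem.Dict.getD_of_get?_eq_some _ [] hpv
    simp only [List.map_cons, List.nodup_cons] at hnd
    have hstep : crStepA s st p = crStepL s st p.1 := by
      unfold crStepA crStepL
      rw [hgetD]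
    simp only [List.map_cons, List.foldl_cons]
    rw [hstep]
    apply ih
    · intro q hq
      have hne : q.1 ≠ p.1 := by
        intro he
        exact hnd.1 (he ▸ (List.mem_map_of_mem hq))
      unfold crStepL
      rcases hr : PySem.List.remove? (st.1.getD p.1 []) s with _ | lst'
      · exact hget q (by simp [hq])
      · simp only
        split <;>
          simpa [PySem.Dict.get?_insert_of_ne _ _ hne] using hget q (by simp [hq])
    · exact hnd.2

-- irrelevant keys (those whose original list does not contain s) are no-ops for crStepL
theorem crStepL_id (d0 : PySem.Dict Int (List Int)) (s : Int)
    (st : PySem.Dict Int (List Int) × List Int × Int) (k : Int)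
    (hinv : crInv d0 st.1) (hk : s ∉ d0.getD k []) : crStepL s st k = st := by
  unfold crStepL
  rcases hg : st.1.get? k with _ | v
  · rw [PySem.Dict.getD_of_get?_eq_none _ [] hg, crRemove?_none (by simp)]
  · rw [PySem.Dict.getD_of_get?_eq_some _ [] hg, crRemove?_none (fun hs => hk (hinv k v hg s hs))]

-- crStepL preserves the invariant and the key list
theorem crStepL_inv (d0 : PySem.Dict Int (List Int)) (s : Int)
    (st : PySem.Dict Int (List Int) × List Int × Int) (k : Int)
    (hinv : crInv d0 st.1) : crInv d0 (crStepL s st k).1 := by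
  unfold crStepL
  rcases hg : st.1.get? k with _ | v
  · rw [PySem.Dict.getD_of_get?_eq_none _ [] hg, crRemove?_none (by simp)]; exact hinv
  · rw [PySem.Dict.getD_of_get?_eq_some _ [] hg]
    rcases hr : PySem.List.remove? v s with _ | v'
    · exact hinv
    · have hsub : ∀ x ∈ v', x ∈ v := crRemove?_subset hr
      have hnew : crInv d0 (st.1.insert k v') := by
        intro k' w hw x hx
        by_cases he : k' = k
        · subst he
          rw [PySem.Dict.get?_insert_self] at hw
          cases hw
          exact hinv k' v hg x (hsub x hx)
        · rw [PySem.Dict.get?_insert_of_ne _ _ he] at hw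
          exact hinv k' w hw x hx
      simp only
      split <;> exact hnew

theorem crStepL_keys (s : Int)
    (st : PySem.Dict Int (List Int) × List Int × Int) (k : Int) :
    (crStepL s st k).1.keys = st.1.keys := by
  unfold crStepL
  rcases hg : st.1.get? k with _ | v
  · rw [PySem.Dict.getD_of_get?_eq_none _ [] hg, crRemove?_none (by simp)]
  · rw [PySem.Dict.getD_of_get?_eq_some _ [] hg]
    rcases hr : PySem.List.remove? v s with _ | v'
    · rfl
    · have hc : st.1.contains k = true := by
        rw [PySem.Dict.contains_eq_isSome_get?, hg]; rfl
      simp only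
      split <;> exact PySem.Dict.keys_insert_of_contains _ _ hc

theorem crFoldL_inv (d0 : PySem.Dict Int (List Int)) (s : Int) :
    ∀ (l : List Int) (st : PySem.Dict Int (List Int) × List Int × Int),
      crInv d0 st.1 →
      crInv d0 (l.foldl (crStepL s) st).1 ∧ (l.foldl (crStepL s) st).1.keys = st.1.keys := by
  intro l
  induction l with
  | nil => intro st h; exact ⟨h, rfl⟩
  | cons k tl ih =>
    intro st h
    rw [List.foldl_cons]
    rcases ih (crStepL s st k) (crStepL_inv d0 s st k h) with ⟨h1, h2⟩
    exact ⟨h1, h2.trans (crStepL_keys s st k)⟩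

-- folding over a key list equals folding over its filter to keys whose original list contains s
theorem crFoldL_filter (d0 : PySem.Dict Int (List Int)) (s : Int) :
    ∀ (l : List Int) (st : PySem.Dict Int (List Int) × List Int × Int),
      crInv d0 st.1 →
      l.foldl (crStepL s) st
        = (l.filter (fun k => decide (s ∈ d0.getD k []))).foldl (crStepL s) st := by
  intro l
  induction l with
  | nil => intro st _; rfl
  | cons k tl ih =>
    intro st h
    by_cases hk : s ∈ d0.getD k []
    · rw [List.foldl_cons, List.filter_cons_of_pos (by simpa using hk), List.foldl_cons]
      exact ih _ (crStepL_inv d0 s st k h)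
    · rw [List.foldl_cons, List.filter_cons_of_neg (by simpa using hk), crStepL_id d0 s st k h hk]
      exact ih _ h

-- turn the items-level filter into a keys-level filter
theorem crItemsFilter (d0 : PySem.Dict Int (List Int)) (s : Int) :
    ∀ (ps : List (Int × List Int)), (∀ p ∈ ps, d0.getD p.1 [] = p.2) →
      (ps.filter (fun p => decide (s ∈ p.2))).map (·.1)
        = (ps.map (·.1)).filter (fun k => decide (s ∈ d0.getD k [])) := by
  intro ps
  induction ps with
  | nil => intro _; rfl
  | cons p tl ih =>
    intro h
    have hp : d0.getD p.1 [] = p.2 := h p (by simp)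
    have htl := ih (fun q hq => h q (by simp [hq]))
    by_cases hm : s ∈ p.2
    · rw [List.filter_cons_of_pos (by simpa using hm), List.map_cons, List.map_cons,
        List.filter_cons_of_pos (by simp [hp, hm]), htl]
    · rw [List.filter_cons_of_neg (by simpa using hm), List.map_cons,
        List.filter_cons_of_neg (by simp [hp, hm]), htl]

-- one ghost step and one counter step from related states stay related
theorem crStep_sim (s k : Int) (d : PySem.Dict Int (List Int))
    (cnt : PySem.Dict (Int × Int) Int) (total : PySem.Dict Int Int)
    (buf : List Int) (n : Int) (hrel : crRel d cnt total) :
    crRel (crStepL s (d, buf, n) k).1 (crStepC s (cnt, total, buf, n) k).1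
        (crStepC s (cnt, total, buf, n) k).2.1 ∧
      (crStepC s (cnt, total, buf, n) k).2.2 = (crStepL s (d, buf, n) k).2 := by
  obtain ⟨hT, hC⟩ := hrel
  by_cases hm : s ∈ d.getD k []
  · have hrm := PySem.List.remove?_eq_some_erase _ _ hm
    have hcpos : 0 < (d.getD k []).count s := List.count_pos_iff.mpr hm
    have hlc : ((d.getD k []).erase s).count s = (d.getD k []).count s - 1 :=
      List.count_erase_self
    have hlen : ((d.getD k []).erase s).length + 1 = (d.getD k []).length := by
      rw [List.length_erase_of_mem hm]
      have := List.length_pos_of_mem hm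
      omega
    have hc0 : (0:Int) < cnt.getD (k, s) 0 := by
      rw [hC k s]; exact_mod_cast hcpos
    have ht : total.getD k 0 - 1 = (((d.getD k []).erase s).length : Int) := by
      rw [hT k]; omega
    have hrel' : crRel (d.insert k ((d.getD k []).erase s))
        (cnt.insert (k, s) (cnt.getD (k, s) 0 - 1))
        (total.insert k ((((d.getD k []).erase s).length : Int))) := by
      constructor
      · intro k'
        by_cases he : k' = k
        · subst he; rw [PySem.Dict.getD_insert_self, PySem.Dict.getD_insert_self]
        · rw [PySem.Dict.getD_insert_of_ne _ _ _ he, PySem.Dict.getD_insert_of_ne _ _ _ he]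
          exact hT k'
      · intro k' s'
        by_cases he : k' = k
        · subst he
          by_cases hs' : s' = s
          · subst hs'
            rw [PySem.Dict.getD_insert_self, PySem.Dict.getD_insert_self, hC k' s']
            omega
          · have hne : (k', s') ≠ (k', s) := by simp [hs']
            rw [PySem.Dict.getD_insert_of_ne _ _ _ hne, PySem.Dict.getD_insert_self,
              hC k' s', List.count_erase_of_ne hs']
        · have hne : (k', s') ≠ (k, s) := by simp [he]
          rw [PySem.Dict.getD_insert_of_ne _ _ _ hne, PySem.Dict.getD_insert_of_ne _ _ _ he]
          exact hC k' s'
    simp only [crStepL, crStepC, hrm, if_pos hc0, ht]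
    by_cases hz : ((d.getD k []).erase s).length = 0
    · have hzi : (((d.getD k []).erase s).length : Int) = 0 := by exact_mod_cast hz
      rw [if_pos hz, if_pos hzi]
      exact ⟨hrel', rfl⟩
    · have hzi : ¬ (((d.getD k []).erase s).length : Int) = 0 := by exact_mod_cast hz
      rw [if_neg hz, if_neg hzi]
      exact ⟨hrel', rfl⟩
  · have hc0 : ¬ (0:Int) < cnt.getD (k, s) 0 := by
      rw [hC k s, List.count_eq_zero.mpr hm]
      simp
    simp only [crStepL, crStepC, crRemove?_none hm, if_neg hc0]
    exact ⟨⟨hT, hC⟩, trivial⟩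

-- folding the two steps over the same key list from related states gives equal buffers and counts
theorem crFold_sim (s : Int) :
    ∀ (l : List Int) (d : PySem.Dict Int (List Int)) (cnt : PySem.Dict (Int × Int) Int)
      (total : PySem.Dict Int Int) (buf : List Int) (n : Int), crRel d cnt total →
      crRel (l.foldl (crStepL s) (d, buf, n)).1 (l.foldl (crStepC s) (cnt, total, buf, n)).1
          (l.foldl (crStepC s) (cnt, total, buf, n)).2.1 ∧
        (l.foldl (crStepC s) (cnt, total, buf, n)).2.2 = (l.foldl (crStepL s) (d, buf, n)).2 := by
  intro l
  induction l with
  | nil => intro d cnt total buf n h; exact ⟨h, rfl⟩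
  | cons k tl ih =>
    intro d cnt total buf n h
    obtain ⟨h1, h2⟩ := crStep_sim s k d cnt total buf n h
    have hb : (crStepC s (cnt, total, buf, n) k).2.2.1 = (crStepL s (d, buf, n) k).2.1 :=
      congrArg Prod.fst h2
    have hn : (crStepC s (cnt, total, buf, n) k).2.2.2 = (crStepL s (d, buf, n) k).2.2 :=
      congrArg Prod.snd h2
    have hCeq : crStepC s (cnt, total, buf, n) k
        = ((crStepC s (cnt, total, buf, n) k).1, (crStepC s (cnt, total, buf, n) k).2.1,
           (crStepL s (d, buf, n) k).2.1, (crStepL s (d, buf, n) k).2.2) := by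
      rw [← hb, ← hn]
    have hLeq : crStepL s (d, buf, n) k
        = ((crStepL s (d, buf, n) k).1, (crStepL s (d, buf, n) k).2.1,
           (crStepL s (d, buf, n) k).2.2) := rfl
    rw [List.foldl_cons, List.foldl_cons, hCeq, hLeq]
    exact ih _ _ _ _ _ h1

-- characterisation of crBuild
theorem crBuildInner (k : Int) :
    ∀ (v u : List Int) (rev : PySem.Dict Int (List Int)) (cnt : PySem.Dict (Int × Int) Int)
      (total : PySem.Dict Int Int),
      (∀ s, cnt.get? (k, s) = if s ∈ u then some ((u.count s : Int)) else none) →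
      (∀ s, (v.foldl (crBuildStep k) (rev, cnt, total)).2.1.get? (k, s)
          = if s ∈ u ++ v then some (((u ++ v).count s : Int)) else none) ∧
      (∀ k' s, k' ≠ k → (v.foldl (crBuildStep k) (rev, cnt, total)).2.1.get? (k', s)
          = cnt.get? (k', s)) ∧
      (∀ t, (v.foldl (crBuildStep k) (rev, cnt, total)).1.getD t []
          = rev.getD t [] ++ (if t ∈ v ∧ t ∉ u then [k] else [])) ∧
      (v.foldl (crBuildStep k) (rev, cnt, total)).2.2 = total := by
  intro v
  induction v with
  | nil =>
    intro u rev cnt total hc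
    refine ⟨fun s => by simpa using hc s, fun k' s _ => rfl, fun t => by simp, rfl⟩
  | cons x v' ih =>
    intro u rev cnt total hc
    rw [List.foldl_cons]
    by_cases hx : x ∈ u
    · have hg : cnt.get? (k, x) = some ((u.count x : Int)) := by rw [hc x]; simp [hx]
      have hstep : crBuildStep k (rev, cnt, total)
          x = (rev, cnt.insert (k, x) ((u.count x : Int) + 1), total) := by
        unfold crBuildStep; rw [hg]
      rw [hstep]
      have hc' : ∀ s, (cnt.insert (k, x) ((u.count x : Int) + 1)).get? (k, s)
          = if s ∈ u ++ [x] then some (((u ++ [x]).count s : Int)) else none := by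
        intro s
        by_cases hs : s = x
        · subst hs
          rw [PySem.Dict.get?_insert_self]
          simp [hx, List.count_append]
        · have hne : (k, s) ≠ (k, x) := by simp [hs]
          have hs2 : x ≠ s := fun h => hs h.symm
          rw [PySem.Dict.get?_insert_of_ne _ _ hne, hc s]
          by_cases hsu : s ∈ u <;> simp [hsu, hs, hs2, List.count_append]
      obtain ⟨h1, h2, h3, h4⟩ := ih (u ++ [x]) rev _ total hc'
      refine ⟨fun s => ?_, fun k' s hk' => ?_, fun t => ?_, h4⟩
      · rw [h1 s, List.append_assoc]
        rfl
      · have hne : (k', s) ≠ (k, x) := by simp [hk']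
        rw [h2 k' s hk', PySem.Dict.get?_insert_of_ne _ _ hne]
      · rw [h3 t]
        by_cases htx : t = x
        · subst htx; simp [hx]
        · by_cases htu : t ∈ u <;> simp [htx, htu, List.mem_append]
    · have hg : cnt.get? (k, x) = none := by rw [hc x]; simp [hx]
      have hstep : crBuildStep k (rev, cnt, total)
          x = (rev.modify x [] (· ++ [k]), cnt.insert (k, x) 1, total) := by
        unfold crBuildStep; rw [hg]
      rw [hstep]
      have hc' : ∀ s, (cnt.insert (k, x) 1).get? (k, s)
          = if s ∈ u ++ [x] then some (((u ++ [x]).count s : Int)) else none := by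
        intro s
        by_cases hs : s = x
        · subst hs
          rw [PySem.Dict.get?_insert_self]
          simp [hx, List.count_append, List.count_eq_zero.mpr hx]
        · have hne : (k, s) ≠ (k, x) := by simp [hs]
          have hs2 : x ≠ s := fun h => hs h.symm
          rw [PySem.Dict.get?_insert_of_ne _ _ hne, hc s]
          by_cases hsu : s ∈ u <;> simp [hsu, hs, hs2, List.count_append]
      obtain ⟨h1, h2, h3, h4⟩ := ih (u ++ [x]) _ _ total hc'
      refine ⟨fun s => ?_, fun k' s hk' => ?_, fun t => ?_, h4⟩
      · rw [h1 s, List.append_assoc]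
        rfl
      · have hne : (k', s) ≠ (k, x) := by simp [hk']
        rw [h2 k' s hk', PySem.Dict.get?_insert_of_ne _ _ hne]
      · rw [h3 t]
        by_cases htx : t = x
        · subst htx
          rw [PySem.Dict.getD_modify_self]
          simp [hx]
        · rw [PySem.Dict.getD_modify_of_ne _ _ _ htx]
          by_cases htu : t ∈ u <;> simp [htx, htu, List.mem_append]

theorem crBuildOuter :
    ∀ (ps : List (Int × List Int)) (rev : PySem.Dict Int (List Int))
      (cnt : PySem.Dict (Int × Int) Int) (total : PySem.Dict Int Int),
      (∀ p ∈ ps, ∀ s, cnt.get? (p.1, s) = none) → (ps.map (·.1)).Nodup →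
      (∀ t, (ps.foldl (fun st p => p.2.foldl (crBuildStep p.1)
            (st.1, st.2.1, st.2.2.insert p.1 (p.2.length : Int))) (rev, cnt, total)).1.getD t []
          = rev.getD t [] ++ (ps.filter (fun p => decide (t ∈ p.2))).map (·.1)) ∧
      (∀ p ∈ ps, (∀ s, (ps.foldl (fun st p => p.2.foldl (crBuildStep p.1)
            (st.1, st.2.1, st.2.2.insert p.1 (p.2.length : Int))) (rev, cnt, total)).2.1.getD (p.1, s) 0
          = (p.2.count s : Int)) ∧
          (ps.foldl (fun st p => p.2.foldl (crBuildStep p.1)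
            (st.1, st.2.1, st.2.2.insert p.1 (p.2.length : Int))) (rev, cnt, total)).2.2.getD p.1 0
          = (p.2.length : Int)) ∧
      (∀ k, k ∉ ps.map (·.1) →
          (∀ s, (ps.foldl (fun st p => p.2.foldl (crBuildStep p.1)
            (st.1, st.2.1, st.2.2.insert p.1 (p.2.length : Int))) (rev, cnt, total)).2.1.get? (k, s)
            = cnt.get? (k, s)) ∧
          (ps.foldl (fun st p => p.2.foldl (crBuildStep p.1)
            (st.1, st.2.1, st.2.2.insert p.1 (p.2.length : Int))) (rev, cnt, total)).2.2.get? k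
          = total.get? k) := by
  intro ps
  induction ps with
  | nil =>
    intro rev cnt total hc hnd
    exact ⟨fun t => by simp, fun p hp => absurd hp (by simp), fun k _ => ⟨fun s => rfl, rfl⟩⟩
  | cons p ps' ih =>
    intro rev cnt total hc hnd
    rw [List.map_cons, List.nodup_cons] at hnd
    have hc0 : ∀ s, cnt.get? (p.1, s)
        = if s ∈ ([] : List Int) then some ((([] : List Int).count s : Int)) else none := by
      intro s; simp [hc p (by simp) s]
    obtain ⟨g1, g2, g3, g4⟩ :=
      crBuildInner p.1 p.2 [] rev cnt (total.insert p.1 (p.2.length : Int)) hc0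
    rw [List.foldl_cons]
    simp only
    have hcih : ∀ q ∈ ps', ∀ s,
        (p.2.foldl (crBuildStep p.1) (rev, cnt, total.insert p.1 (p.2.length : Int))).2.1.get?
          (q.1, s) = none := by
      intro q hq s
      have hne : q.1 ≠ p.1 := fun he => hnd.1 (he ▸ List.mem_map_of_mem hq)
      rw [g2 q.1 s hne]
      exact hc q (by simp [hq]) s
    obtain ⟨i1, i2, i3⟩ := ih
      (p.2.foldl (crBuildStep p.1) (rev, cnt, total.insert p.1 (p.2.length : Int))).1
      (p.2.foldl (crBuildStep p.1) (rev, cnt, total.insert p.1 (p.2.length : Int))).2.1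
      (p.2.foldl (crBuildStep p.1) (rev, cnt, total.insert p.1 (p.2.length : Int))).2.2
      hcih hnd.2
    have hsplit : p.2.foldl (crBuildStep p.1) (rev, cnt, total.insert p.1 (p.2.length : Int))
        = ((p.2.foldl (crBuildStep p.1) (rev, cnt, total.insert p.1 (p.2.length : Int))).1,
           (p.2.foldl (crBuildStep p.1) (rev, cnt, total.insert p.1 (p.2.length : Int))).2.1,
           (p.2.foldl (crBuildStep p.1) (rev, cnt, total.insert p.1 (p.2.length : Int))).2.2) := rfl
    rw [hsplit]
    refine ⟨fun t => ?_, fun q hq => ?_, fun k hk => ?_⟩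
    · rw [i1 t, g3 t, List.filter_cons]
      by_cases hm : t ∈ p.2 <;> simp [hm, List.append_assoc]
    · rcases List.mem_cons.mp hq with hq | hq
      · subst hq
        constructor
        · intro s
          rw [PySem.Dict.getD_eq_get?_getD, (i3 q.1 hnd.1).1 s, g1 s, List.nil_append]
          by_cases hs : s ∈ q.2
          · simp [hs]
          · simp [hs, List.count_eq_zero.mpr hs]
        · rw [PySem.Dict.getD_eq_get?_getD, (i3 q.1 hnd.1).2, g4,
            PySem.Dict.get?_insert_self]
          rfl
      · exact i2 q hq
    · have hk' : k ∉ ps'.map (·.1) := fun h => hk (by simp [h])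
      have hkp : k ≠ p.1 := fun h => hk (by simp [h])
      obtain ⟨j1, j2⟩ := i3 k hk'
      refine ⟨fun s => ?_, ?_⟩
      · rw [j1 s, g2 k s hkp]
      · rw [j2, g4, PySem.Dict.get?_insert_of_ne _ _ hkp]

-- the main bisimulation: with the invariant and the relation, A's loop equals B's loop
theorem crLoop_eq (d0 : PySem.Dict Int (List Int)) (rev0 : PySem.Dict Int (List Int))
    (hnd : d0.keys.Nodup)
    (hrev : ∀ s, rev0.getD s [] = (d0.items.filter (fun p => decide (s ∈ p.2))).map (·.1)) :
    ∀ (fuel : Nat) (d : PySem.Dict Int (List Int)) (cnt : PySem.Dict (Int × Int) Int)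
      (total : PySem.Dict Int Int) (buffer : List Int) (n : Int),
      d.keys = d0.keys → crInv d0 d → crRel d cnt total →
      crLoopA fuel d buffer n = crLoopC fuel rev0 cnt total buffer n := by
  intro fuel
  induction fuel with
  | zero => intro d cnt total buffer n _ _ _; rfl
  | succ fuel ih =>
    intro d cnt total buffer n hkeys hinv hrel
    unfold crLoopA crLoopC
    rcases hp : PySem.List.pop? buffer with _ | sb
    · rfl
    · obtain ⟨s, buffer'⟩ := sb
      have hndd : d.keys.Nodup := hkeys ▸ hnd
      have hkeys_eq : d.items.map (·.1) = d.keys := rfl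
      have hsnap : ∀ p ∈ d.items, d.get? p.1 = some p.2 := by
        intro p hp'
        exact PySem.Dict.get?_of_mem_items _ hp' hndd
      have h1 : d.items.foldl (crStepA s) (d, buffer', n)
          = d.keys.foldl (crStepL s) (d, buffer', n) := by
        rw [crFoldA_eq_foldL s d.items (d, buffer', n) hsnap (hkeys_eq ▸ hndd), hkeys_eq]
      have hrevs : rev0.getD s []
          = d.keys.filter (fun k => decide (s ∈ d0.getD k [])) := by
        rw [hrev s, crItemsFilter d0 s d0.items
          (fun p hp' => PySem.Dict.getD_of_mem_items _ hp' hnd [])]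
        rw [hkeys]; rfl
      have h2 : d.keys.foldl (crStepL s) (d, buffer', n)
          = (rev0.getD s []).foldl (crStepL s) (d, buffer', n) := by
        rw [hrevs]
        exact crFoldL_filter d0 s d.keys (d, buffer', n) hinv
      simp only
      rw [h1, h2]
      obtain ⟨hrel', hbn⟩ := crFold_sim s (rev0.getD s []) d cnt total buffer' n hrel
      obtain ⟨hinv', hkeys'⟩ := crFoldL_inv d0 s (rev0.getD s []) (d, buffer', n) hinv
      have hb := congrArg Prod.fst hbn
      have hn2 := congrArg Prod.snd hbn
      rw [hb, hn2]
      exact ih _ _ _ _ _ (hkeys'.trans hkeys) hinv' hrel'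


-- ===== VERDICT (by name: the statement is the Claim_ definition above) =====
theorem chain_reaction_spec : Claim_equal_chain_reaction := by
  intro deps brick _
  unfold Spec_chain_reaction chain_reaction chain_reaction_alt
  simp only
  have hnd : (PySem.Dict.ofList deps).keys.Nodup := PySem.Dict.nodup_keys_ofList deps
  obtain ⟨g1, g2, g3⟩ := crBuildOuter (PySem.Dict.ofList deps).items
    PySem.Dict.empty PySem.Dict.empty PySem.Dict.empty
    (fun p _ s => PySem.Dict.get?_empty _) hnd
  have hrev : ∀ s, (crBuild (PySem.Dict.ofList deps).items).1.getD s []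
      = ((PySem.Dict.ofList deps).items.filter (fun p => decide (s ∈ p.2))).map (·.1) := by
    intro s
    unfold crBuild
    rw [g1 s, PySem.Dict.getD_empty]
    rfl
  have hrel0 : crRel (PySem.Dict.ofList deps)
      (crBuild (PySem.Dict.ofList deps).items).2.1
      (crBuild (PySem.Dict.ofList deps).items).2.2 := by
    constructor
    · intro k
      unfold crBuild
      by_cases hk : k ∈ (PySem.Dict.ofList deps).items.map (·.1)
      · obtain ⟨p, hpmem, rfl⟩ := List.mem_map.mp hk
        rw [PySem.Dict.getD_of_mem_items _ hpmem hnd []]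
        exact (g2 p hpmem).2
      · have hcf : (PySem.Dict.ofList deps).contains k = false := by
          rw [Bool.eq_false_iff]
          exact fun hcc => hk ((PySem.Dict.contains_iff_mem_keys _ _).mp hcc)
        rw [PySem.Dict.getD_of_not_contains _ _ hcf]
        rw [PySem.Dict.getD_eq_get?_getD, (g3 k hk).2, PySem.Dict.get?_empty]
        rfl
    · intro k s
      unfold crBuild
      by_cases hk : k ∈ (PySem.Dict.ofList deps).items.map (·.1)
      · obtain ⟨p, hpmem, rfl⟩ := List.mem_map.mp hk
        rw [PySem.Dict.getD_of_mem_items _ hpmem hnd []]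
        exact (g2 p hpmem).1 s
      · have hcf : (PySem.Dict.ofList deps).contains k = false := by
          rw [Bool.eq_false_iff]
          exact fun hcc => hk ((PySem.Dict.contains_iff_mem_keys _ _).mp hcc)
        rw [PySem.Dict.getD_of_not_contains _ _ hcf]
        rw [PySem.Dict.getD_eq_get?_getD, (g3 k hk).1 s, PySem.Dict.get?_empty]
        rfl
  have hinv0 : crInv (PySem.Dict.ofList deps) (PySem.Dict.ofList deps) := by
    intro k v hg x hx
    rw [PySem.Dict.getD_of_get?_eq_some _ [] hg]
    exact hx
  exact (crLoop_eq (PySem.Dict.ofList deps) (crBuild (PySem.Dict.ofList deps).items).1 hnd hrev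
    ((PySem.Dict.ofList deps).size + 1) (PySem.Dict.ofList deps) _ _ [brick] 0 rfl hinv0 hrel0)
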